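-- pv_equiv track=rewrite | github.com/vivek1918/document_verification_system | verifier/normalize/cleaners.py | correct_text
-- ===== SOURCE A (Python) =====
-- from typing import Optional, Dict, Any
--
-- CONFUSION_MAP = {
--     'O': '0', 'o': '0',  # Letter O to zero
--     'S': '5', 's': '5',  # Letter S to five
--     'I': '1', 'l': '1',  # Letter I/l to one
--     'B': '8', 'Z': '2',  # Letter B to eight, Z to two
--     ' ': '',  # Remove spaces for certain fields
-- }
--
-- REVERSE_CONFUSION_MAP = {
--     '0': 'O', '5': 'S', '1': 'I', '8': 'B', '2': 'Z'
-- }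
--
-- def correct_text(text: str, field_hint: Optional[str] = None) -> str:
--     """
--     Apply character confusion corrections based on field context.
--
--     Args:
--         text: Input text to correct
--         field_hint: Field type hint ('numeric', 'alpha', 'alphanumeric', None)
--
--     Returns:
--         Corrected text
--     """
--     if not text or not isinstance(text, str):
--         return text
--
--     original_text = text
--
--     if field_hint == 'numeric':
--         # Apply corrections for numeric fields
--         for wrong, correct in CONFUSION_MAP.items():
--             text = text.replace(wrong, correct)
--
--     elif field_hint == 'alpha':
--         # Apply reverse corrections for alpha fields
--         for wrong, correct in REVERSE_CONFUSION_MAP.items():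
--             text = text.replace(wrong, correct)
--
--     else:  # alphanumeric or unknown
--         # Be more conservative, only apply obvious corrections
--         corrections = {
--             'O': '0',  # Capital O to zero in mixed contexts
--             'l': '1',  # Lowercase L to one
--             'I': '1',  # Capital I to one
--         }
--         for wrong, correct in corrections.items():
--             text = text.replace(wrong, correct)
--
--     return text
-- ===== SOURCE B (Python) =====
-- def _numeric_fix(c):
--     if c == 'O' or c == 'o':
--         return '0'
--     if c == 'S' or c == 's':
--         return '5'
--     if c == 'I' or c == 'l':
--         return '1'
--     if c == 'B':
--         return '8'
--     if c == 'Z':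
--         return '2'
--     if c == ' ':
--         return ''
--     return c
--
--
-- def _alpha_fix(c):
--     if c == '0':
--         return 'O'
--     if c == '5':
--         return 'S'
--     if c == '1':
--         return 'I'
--     if c == '8':
--         return 'B'
--     if c == '2':
--         return 'Z'
--     return c
--
--
-- def _mixed_fix(c):
--     if c == 'O':
--         return '0'
--     if c == 'l' or c == 'I':
--         return '1'
--     return c
--
--
-- def correct_text(text, field_hint=None):
--     """Single pass: resolve the hint to one per-character correction function,
--     then map it over the text once (no repeated full-string replace scans)."""
--     if not text or not isinstance(text, str):
--         return text
--     if field_hint == 'numeric':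
--         fix = _numeric_fix
--     elif field_hint == 'alpha':
--         fix = _alpha_fix
--     else:
--         fix = _mixed_fix
--     return ''.join(fix(c) for c in text)
-- ===== Notes on version B (the rewrite author's own statement) =====
-- stated objective: alternative
-- what changed: Replaced A's chain of per-entry full-string str.replace passes with one per-character correction function per branch applied in a single pass over the text (space maps to the empty string, i.e. deletion); no dict/map data structure at all.
import Mathlib
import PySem

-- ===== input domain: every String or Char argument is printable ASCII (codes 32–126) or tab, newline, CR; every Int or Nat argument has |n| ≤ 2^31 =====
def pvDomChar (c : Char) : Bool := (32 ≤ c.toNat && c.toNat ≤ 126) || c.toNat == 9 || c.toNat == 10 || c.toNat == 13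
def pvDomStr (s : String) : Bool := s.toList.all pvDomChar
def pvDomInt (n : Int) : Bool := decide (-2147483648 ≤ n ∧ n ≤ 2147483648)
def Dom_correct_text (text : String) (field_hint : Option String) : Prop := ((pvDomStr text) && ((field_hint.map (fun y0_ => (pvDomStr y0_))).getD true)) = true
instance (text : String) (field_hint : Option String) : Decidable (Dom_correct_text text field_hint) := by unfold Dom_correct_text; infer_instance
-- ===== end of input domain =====

-- B replaces A's chain of per-entry str.replace passes with one per-character correction function applied in a single pass (same result).

-- ===== PORT A =====
def pvConfusionMap : PySem.Dict String String :=
  PySem.Dict.ofList [("O","0"),("o","0"),("S","5"),("s","5"),("I","1"),("l","1"),("B","8"),("Z","2"),(" ","")]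
def pvReverseConfusionMap : PySem.Dict String String :=
  PySem.Dict.ofList [("0","O"),("5","S"),("1","I"),("8","B"),("2","Z")]
def pvCorrectionsMap : PySem.Dict String String :=
  PySem.Dict.ofList [("O","0"),("l","1"),("I","1")]

def correct_text (text : String) (field_hint : Option String) : String :=
  if text = "" then text
  else if field_hint = some "numeric" then
    pvConfusionMap.items.foldl (fun t p => PySem.Str.replace t p.1 p.2) text
  else if field_hint = some "alpha" then
    pvReverseConfusionMap.items.foldl (fun t p => PySem.Str.replace t p.1 p.2) text
  else
    pvCorrectionsMap.items.foldl (fun t p => PySem.Str.replace t p.1 p.2) text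

-- ===== PORT B =====
def pvNumericFix (c : Char) : List Char :=
  if c = 'O' ∨ c = 'o' then ['0']
  else if c = 'S' ∨ c = 's' then ['5']
  else if c = 'I' ∨ c = 'l' then ['1']
  else if c = 'B' then ['8']
  else if c = 'Z' then ['2']
  else if c = ' ' then []
  else [c]

def pvAlphaFix (c : Char) : List Char :=
  if c = '0' then ['O']
  else if c = '5' then ['S']
  else if c = '1' then ['I']
  else if c = '8' then ['B']
  else if c = '2' then ['Z']
  else [c]

def pvMixedFix (c : Char) : List Char :=
  if c = 'O' then ['0']
  else if c = 'l' ∨ c = 'I' then ['1']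
  else [c]

def correct_text_alt (text : String) (field_hint : Option String) : String :=
  if text = "" then text
  else
    let fix : Char → List Char :=
      if field_hint = some "numeric" then pvNumericFix
      else if field_hint = some "alpha" then pvAlphaFix
      else pvMixedFix
    String.ofList (text.toList.flatMap fix)

-- ===== PRECONDITION & SPEC =====
def Spec_correct_text (text : String) (field_hint : Option String) (out : String) : Prop := out = correct_text_alt text field_hint
instance (text : String) (field_hint : Option String) (out : String) : Decidable (Spec_correct_text text field_hint out) := by unfold Spec_correct_text; infer_instance

-- ===== CLAIM (what is proved, stated in full; the proofs are below) =====
def Claim_equal_correct_text : Prop := ∀ (text : String) (field_hint : Option String), Dom_correct_text text field_hint → Spec_correct_text text field_hint (correct_text text field_hint)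

-- ===== LEMMAS AND PROOFS =====

-- replace with a single-char pattern is a per-character flatMap
theorem pv_go_single (a : Char) (bs : List Char) : ∀ (cs acc : List Char),
    PySem.Chars.replace.go [a] bs cs.length cs acc
      = acc.reverse ++ cs.flatMap (fun c => if c = a then bs else [c]) := by
  intro cs
  induction cs with
  | nil => intro acc; simp [PySem.Chars.replace.go]
  | cons c t ih =>
    intro acc
    simp only [List.length_cons, PySem.Chars.replace.go]
    by_cases h : c = a
    · simp [h, List.isPrefixOf, ih]
    · simp [List.isPrefixOf, h, ih, Ne.symm h]

theorem pv_replace_single (a : Char) (bs cs : List Char) :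
    PySem.Chars.replace cs [a] bs = cs.flatMap (fun c => if c = a then bs else [c]) := by
  simp [PySem.Chars.replace, pv_go_single]

theorem pv_num_branch (cs : List Char) :
    PySem.Chars.replace (PySem.Chars.replace (PySem.Chars.replace (PySem.Chars.replace (PySem.Chars.replace (PySem.Chars.replace (PySem.Chars.replace (PySem.Chars.replace (PySem.Chars.replace (cs) ['O'] ['0']) ['o'] ['0']) ['S'] ['5']) ['s'] ['5']) ['I'] ['1']) ['l'] ['1']) ['B'] ['8']) ['Z'] ['2']) [' '] []
      = cs.flatMap pvNumericFix := by
  simp only [pv_replace_single, List.flatMap_assoc]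
  congr 1
  funext c
  by_cases h0 : c = 'O'
  · subst h0; decide
  by_cases h1 : c = 'o'
  · subst h1; decide
  by_cases h2 : c = 'S'
  · subst h2; decide
  by_cases h3 : c = 's'
  · subst h3; decide
  by_cases h4 : c = 'I'
  · subst h4; decide
  by_cases h5 : c = 'l'
  · subst h5; decide
  by_cases h6 : c = 'B'
  · subst h6; decide
  by_cases h7 : c = 'Z'
  · subst h7; decide
  by_cases h8 : c = ' '
  · subst h8; decide
  simp [h0, h1, h2, h3, h4, h5, h6, h7, h8, pvNumericFix]

theorem pv_alpha_branch (cs : List Char) :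
    PySem.Chars.replace (PySem.Chars.replace (PySem.Chars.replace (PySem.Chars.replace (PySem.Chars.replace (cs) ['0'] ['O']) ['5'] ['S']) ['1'] ['I']) ['8'] ['B']) ['2'] ['Z']
      = cs.flatMap pvAlphaFix := by
  simp only [pv_replace_single, List.flatMap_assoc]
  congr 1
  funext c
  by_cases h0 : c = '0'
  · subst h0; decide
  by_cases h1 : c = '5'
  · subst h1; decide
  by_cases h2 : c = '1'
  · subst h2; decide
  by_cases h3 : c = '8'
  · subst h3; decide
  by_cases h4 : c = '2'
  · subst h4; decide
  simp [h0, h1, h2, h3, h4, pvAlphaFix]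

theorem pv_mixed_branch (cs : List Char) :
    PySem.Chars.replace (PySem.Chars.replace (PySem.Chars.replace (cs) ['O'] ['0']) ['l'] ['1']) ['I'] ['1']
      = cs.flatMap pvMixedFix := by
  simp only [pv_replace_single, List.flatMap_assoc]
  congr 1
  funext c
  by_cases h0 : c = 'O'
  · subst h0; decide
  by_cases h1 : c = 'l'
  · subst h1; decide
  by_cases h2 : c = 'I'
  · subst h2; decide
  simp [h0, h1, h2, pvMixedFix]

theorem correct_text_spec : Claim_equal_correct_text := by
  intro text field_hint _
  unfold Spec_correct_text correct_text correct_text_alt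
  by_cases ht : text = ""
  · simp [ht]
  · simp only [ht, if_false]
    by_cases hn : field_hint = some "numeric"
    · simp only [hn]
      apply String.toList_inj.mp
      have hi : pvConfusionMap.items
          = [("O","0"),("o","0"),("S","5"),("s","5"),("I","1"),("l","1"),("B","8"),("Z","2"),(" ","")] := by decide
      rw [hi]
      simp only [List.foldl_cons, List.foldl_nil]
      simpa using pv_num_branch text.toList
    · by_cases ha : field_hint = some "alpha"
      · simp only [ha]
        apply String.toList_inj.mp
        have hi : pvReverseConfusionMap.items
            = [("0","O"),("5","S"),("1","I"),("8","B"),("2","Z")] := by decide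
        rw [hi]
        simp only [List.foldl_cons, List.foldl_nil]
        simpa using pv_alpha_branch text.toList
      · simp only [hn, ha, if_false]
        apply String.toList_inj.mp
        have hi : pvCorrectionsMap.items
            = [("O","0"),("l","1"),("I","1")] := by decide
        rw [hi]
        simp only [List.foldl_cons, List.foldl_nil]
        simpa using pv_mixed_branch text.toList
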